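-- pv_equiv track=rewrite | github.com/VeronikaKavanova/Programming | Cviceni - programovani, algoritmizace/Kapky na skle.py | steceni_kapeck
-- ===== SOURCE A (Python) =====
-- def steceni_kapeck(radek):
--
--     def kapka_doleva():
--         novy_index = index - 1
--         if novy_index >= 0:
--             if novy_radek[novy_index] == "-":
--                 novy_radek[novy_index] = "/"
--             else:
--                 novy_radek[novy_index] = "X"
--
--     def kapka_doprava():
--         novy_index = index + 1
--         if novy_index < len(novy_radek):
--             if novy_radek[novy_index] == "-":
--                 novy_radek[novy_index] = "\\"
--             else:
--                 novy_radek[novy_index] = "X"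
--
--     stary_radek = radek
--     novy_radek = ["-"]*len(stary_radek)
--     for index in range(len(stary_radek)):
--         znak = stary_radek[index]
--         if znak == "/":
--             kapka_doleva()
--         elif znak == "\\":
--             kapka_doprava()
--         elif znak == "X":
--             kapka_doleva()
--             kapka_doprava()
--
--     return novy_radek
-- ===== SOURCE B (Python) =====
-- def steceni_kapeck(radek):
--     n = len(radek)
--     def cell(j):
--         left = j - 1 >= 0 and radek[j - 1] in ('\\', 'X')
--         right = j + 1 < n and radek[j + 1] in ('/', 'X')
--         if left and right:
--             return 'X'
--         if left:
--             return '\\'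
--         if right:
--             return '/'
--         return '-'
--     return [cell(j) for j in range(n)]
-- ===== Notes on version B (the rewrite author's own statement) =====
-- stated objective: alternative
-- what changed: A pushes: it scans the source row and mutates a pre-filled output list at the neighbouring indices, upgrading a cell to a collision mark when it is hit twice; B pulls: it computes each output cell independently from its two source neighbours and builds the list in one comprehension with no mutation.
import Mathlib
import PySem

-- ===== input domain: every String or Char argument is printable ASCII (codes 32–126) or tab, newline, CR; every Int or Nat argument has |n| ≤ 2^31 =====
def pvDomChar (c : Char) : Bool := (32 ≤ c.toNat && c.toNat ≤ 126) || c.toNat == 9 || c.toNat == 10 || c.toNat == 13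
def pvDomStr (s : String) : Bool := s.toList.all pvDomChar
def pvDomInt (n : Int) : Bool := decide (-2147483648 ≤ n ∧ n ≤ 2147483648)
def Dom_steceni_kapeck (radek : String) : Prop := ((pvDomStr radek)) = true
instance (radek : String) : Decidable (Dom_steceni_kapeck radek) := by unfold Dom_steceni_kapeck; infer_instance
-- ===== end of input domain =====

-- B recomputes each output cell independently from its two source neighbours (pull/gather
-- model) instead of A's push model that mutates the output row while scanning the source;
-- objective: alternative decomposition, same O(n) cost.

-- ===== PORT A =====
-- A's inner helper kapka_doleva: the drop falls one step left onto novy_radek[index-1]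
def kapkaDoleva (nr : List String) (index : Nat) : List String :=
  if 1 ≤ index then
    if nr.getD (index - 1) "" = "-" then nr.set (index - 1) "/"
    else nr.set (index - 1) "X"
  else nr

-- A's inner helper kapka_doprava: the drop falls one step right onto novy_radek[index+1]
def kapkaDoprava (nr : List String) (index : Nat) : List String :=
  if index + 1 < nr.length then
    if nr.getD (index + 1) "" = "-" then nr.set (index + 1) "\\"
    else nr.set (index + 1) "X"
  else nr

-- one iteration of A's for-loop body (znak = stary_radek[index])
def stepA (cs : List Char) (nr : List String) (index : Nat) : List String :=
  let znak := cs.getD index ' '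
  if znak = '/' then kapkaDoleva nr index
  else if znak = '\\' then kapkaDoprava nr index
  else if znak = 'X' then kapkaDoprava (kapkaDoleva nr index) index
  else nr

def steceni_kapeck (radek : String) : List String :=
  let cs := radek.toList
  (List.range cs.length).foldl (stepA cs) (List.replicate cs.length "-")

-- ===== PORT B =====
-- Source B's cell(j): gather from the two neighbours of the SOURCE row
def cellB (cs : List Char) (n j : Nat) : String :=
  if (1 ≤ j ∧ (cs.getD (j - 1) ' ' = '\\' ∨ cs.getD (j - 1) ' ' = 'X')) ∧
     (j + 1 < n ∧ (cs.getD (j + 1) ' ' = '/' ∨ cs.getD (j + 1) ' ' = 'X')) then "X"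
  else if 1 ≤ j ∧ (cs.getD (j - 1) ' ' = '\\' ∨ cs.getD (j - 1) ' ' = 'X') then "\\"
  else if j + 1 < n ∧ (cs.getD (j + 1) ' ' = '/' ∨ cs.getD (j + 1) ' ' = 'X') then "/"
  else "-"

def steceni_kapeck_alt (radek : String) : List String :=
  let cs := radek.toList
  (List.range cs.length).map (cellB cs cs.length)

-- ===== PRECONDITION & SPEC =====
def Spec_steceni_kapeck (radek : String) (out : List String) : Prop := out = steceni_kapeck_alt radek
instance (radek : String) (out : List String) : Decidable (Spec_steceni_kapeck radek out) := by unfold Spec_steceni_kapeck; infer_instance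

-- ===== CLAIM (what is proved, stated in full; the proofs are below) =====
def Claim_equal_steceni_kapeck : Prop := ∀ (radek : String), Dom_steceni_kapeck radek → Spec_steceni_kapeck radek (steceni_kapeck radek)

-- ===== LEMMAS AND PROOFS =====

-- the state of A's loop after the first k iterations
def foldA (cs : List Char) (k : Nat) : List String :=
  (List.range k).foldl (stepA cs) (List.replicate cs.length "-")

-- the value cell j holds once exactly the sources with index < k have been processed
def pullVal (cs : List Char) (k j : Nat) : String :=
  if (1 ≤ j ∧ j - 1 < k ∧ (cs.getD (j - 1) ' ' = '\\' ∨ cs.getD (j - 1) ' ' = 'X')) ∧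
     (j + 1 < cs.length ∧ j + 1 < k ∧ (cs.getD (j + 1) ' ' = '/' ∨ cs.getD (j + 1) ' ' = 'X')) then "X"
  else if 1 ≤ j ∧ j - 1 < k ∧ (cs.getD (j - 1) ' ' = '\\' ∨ cs.getD (j - 1) ' ' = 'X') then "\\"
  else if j + 1 < cs.length ∧ j + 1 < k ∧ (cs.getD (j + 1) ' ' = '/' ∨ cs.getD (j + 1) ' ' = 'X') then "/"
  else "-"

lemma getD_set_eq (l : List String) (i j : Nat) (a : String) :
    (l.set i a).getD j "" = if i = j ∧ j < l.length then a else l.getD j "" := by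
  simp [List.getD_eq_getElem?_getD, List.getElem?_set]
  split_ifs <;> simp_all

lemma kapkaDoleva_length (nr : List String) (i : Nat) : (kapkaDoleva nr i).length = nr.length := by
  simp only [kapkaDoleva]; split_ifs <;> simp

lemma kapkaDoprava_length (nr : List String) (i : Nat) : (kapkaDoprava nr i).length = nr.length := by
  simp only [kapkaDoprava]; split_ifs <;> simp

lemma stepA_length (cs : List Char) (nr : List String) (i : Nat) :
    (stepA cs nr i).length = nr.length := by
  simp only [stepA]
  split_ifs <;> simp [kapkaDoleva_length, kapkaDoprava_length]

lemma foldA_length (cs : List Char) (k : Nat) : (foldA cs k).length = cs.length := by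
  induction k with
  | zero => simp [foldA]
  | succ k ih =>
      rw [foldA, List.range_succ, List.foldl_append]
      simpa [stepA_length] using ih

lemma foldA_succ (cs : List Char) (k : Nat) :
    foldA cs (k + 1) = stepA cs (foldA cs k) k := by
  rw [foldA, List.range_succ, List.foldl_append]; rfl


lemma pullVal_succ_eq (cs : List Char) (k j : Nat)
    (hL : j = k + 1 → ¬(cs.getD k ' ' = '\\' ∨ cs.getD k ' ' = 'X'))
    (hR : j + 1 = k → ¬(cs.getD k ' ' = '/' ∨ cs.getD k ' ' = 'X')) :
    pullVal cs (k + 1) j = pullVal cs k j := by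
  have eL : (1 ≤ j ∧ j - 1 < k + 1 ∧ (cs.getD (j - 1) ' ' = '\\' ∨ cs.getD (j - 1) ' ' = 'X'))
      ↔ (1 ≤ j ∧ j - 1 < k ∧ (cs.getD (j - 1) ' ' = '\\' ∨ cs.getD (j - 1) ' ' = 'X')) := by
    constructor
    · rintro ⟨a, b, c⟩
      refine ⟨a, ?_, c⟩
      by_contra hb
      have hj1 : j - 1 = k := by omega
      have : j = k + 1 := by omega
      exact hL this (hj1 ▸ c)
    · rintro ⟨a, b, c⟩; exact ⟨a, by omega, c⟩
  have eR : (j + 1 < cs.length ∧ j + 1 < k + 1 ∧ (cs.getD (j + 1) ' ' = '/' ∨ cs.getD (j + 1) ' ' = 'X'))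
      ↔ (j + 1 < cs.length ∧ j + 1 < k ∧ (cs.getD (j + 1) ' ' = '/' ∨ cs.getD (j + 1) ' ' = 'X')) := by
    constructor
    · rintro ⟨a, b, c⟩
      refine ⟨a, ?_, c⟩
      by_contra hb
      have hj1 : j + 1 = k := by omega
      exact hR hj1 (hj1 ▸ c)
    · rintro ⟨a, b, c⟩; exact ⟨a, by omega, c⟩
  simp only [pullVal, eL, eR]

lemma pullVal_at_succ (cs : List Char) (k : Nat) : pullVal cs k (k + 1) = "-" := by
  simp only [pullVal]
  rw [if_neg, if_neg, if_neg]
  · rintro ⟨-, h, -⟩; omega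
  · rintro ⟨-, h, -⟩; omega
  · rintro ⟨⟨-, h, -⟩, -⟩; omega

lemma pullVal_up_left (cs : List Char) (k : Nat) (_hkn : k + 1 < cs.length)
    (hc : cs.getD k ' ' = '\\' ∨ cs.getD k ' ' = 'X') :
    pullVal cs (k + 1) (k + 1) = "\\" := by
  have hL : 1 ≤ k + 1 ∧ k + 1 - 1 < k + 1 ∧ (cs.getD (k + 1 - 1) ' ' = '\\' ∨ cs.getD (k + 1 - 1) ' ' = 'X') := by
    simp only [Nat.add_sub_cancel]; exact ⟨by omega, by omega, hc⟩
  simp only [pullVal]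
  rw [if_neg, if_pos hL]
  rintro ⟨-, -, h, -⟩; omega

lemma pullVal_up_right (cs : List Char) (k : Nat) (hk1 : 1 ≤ k) (hkn : k < cs.length)
    (hc : cs.getD k ' ' = '/' ∨ cs.getD k ' ' = 'X') :
    pullVal cs (k + 1) (k - 1) = if pullVal cs k (k - 1) = "-" then "/" else "X" := by
  have hR : k - 1 + 1 < cs.length ∧ k - 1 + 1 < k + 1 ∧
      (cs.getD (k - 1 + 1) ' ' = '/' ∨ cs.getD (k - 1 + 1) ' ' = 'X') := by
    have h1 : k - 1 + 1 = k := by omega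
    rw [h1]; exact ⟨hkn, by omega, hc⟩
  have hR0 : ¬(k - 1 + 1 < cs.length ∧ k - 1 + 1 < k ∧
      (cs.getD (k - 1 + 1) ' ' = '/' ∨ cs.getD (k - 1 + 1) ' ' = 'X')) := by
    rintro ⟨-, h, -⟩; omega
  by_cases hLc : 1 ≤ k - 1 ∧ (cs.getD (k - 1 - 1) ' ' = '\\' ∨ cs.getD (k - 1 - 1) ' ' = 'X')
  · have hL : 1 ≤ k - 1 ∧ k - 1 - 1 < k + 1 ∧ (cs.getD (k - 1 - 1) ' ' = '\\' ∨ cs.getD (k - 1 - 1) ' ' = 'X') :=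
      ⟨hLc.1, by omega, hLc.2⟩
    have hL0 : 1 ≤ k - 1 ∧ k - 1 - 1 < k ∧ (cs.getD (k - 1 - 1) ' ' = '\\' ∨ cs.getD (k - 1 - 1) ' ' = 'X') :=
      ⟨hLc.1, by omega, hLc.2⟩
    have hprev : pullVal cs k (k - 1) = "\\" := by
      simp only [pullVal]
      rw [if_neg (fun h => hR0 h.2), if_pos hL0]
    rw [hprev, if_neg (by decide)]
    simp only [pullVal]
    rw [if_pos ⟨hL, hR⟩]
  · have hL : ¬(1 ≤ k - 1 ∧ k - 1 - 1 < k + 1 ∧ (cs.getD (k - 1 - 1) ' ' = '\\' ∨ cs.getD (k - 1 - 1) ' ' = 'X')) := by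
      rintro ⟨a, -, c⟩; exact hLc ⟨a, c⟩
    have hL0 : ¬(1 ≤ k - 1 ∧ k - 1 - 1 < k ∧ (cs.getD (k - 1 - 1) ' ' = '\\' ∨ cs.getD (k - 1 - 1) ' ' = 'X')) := by
      rintro ⟨a, -, c⟩; exact hLc ⟨a, c⟩
    have hprev : pullVal cs k (k - 1) = "-" := by
      simp only [pullVal]
      rw [if_neg (fun h => hL0 h.1), if_neg hL0, if_neg hR0]
    rw [hprev, if_pos rfl]
    simp only [pullVal]
    rw [if_neg (fun h => hL h.1), if_neg hL, if_pos hR]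

lemma kapkaDoleva_getD_ne (nr : List String) (k j : Nat) (h : ¬(1 ≤ k ∧ k - 1 = j)) :
    (kapkaDoleva nr k).getD j "" = nr.getD j "" := by
  simp only [kapkaDoleva]
  split_ifs with a b
  · rw [getD_set_eq, if_neg (fun hh => h ⟨a, hh.1⟩)]
  · rw [getD_set_eq, if_neg (fun hh => h ⟨a, hh.1⟩)]
  · rfl

-- processing source index k with a char that sends a drop left: effect on any cell j ≠ k+1-context
lemma doleva_step (cs : List Char) (k : Nat) (nr : List String)
    (hlen : nr.length = cs.length)
    (ih : ∀ j, j < cs.length → nr.getD j "" = pullVal cs k j)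
    (hk : k < cs.length) (hc : cs.getD k ' ' = '/' ∨ cs.getD k ' ' = 'X')
    (j : Nat) (hj : j < cs.length)
    (hLq : j = k + 1 → ¬(cs.getD k ' ' = '\\' ∨ cs.getD k ' ' = 'X')) :
    (kapkaDoleva nr k).getD j "" = pullVal cs (k + 1) j := by
  simp only [kapkaDoleva]
  split_ifs with hk1 hm
  · rw [getD_set_eq, hlen]
    rw [ih (k - 1) (by omega)] at hm
    split_ifs with hs
    · obtain ⟨rfl, -⟩ := hs
      rw [pullVal_up_right cs k hk1 hk hc, if_pos hm]
    · rw [ih j hj]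
      symm; apply pullVal_succ_eq
      · exact hLq
      · intro hjk
        exfalso; exact hs ⟨by omega, hj⟩
  · rw [getD_set_eq, hlen]
    rw [ih (k - 1) (by omega)] at hm
    split_ifs with hs
    · obtain ⟨rfl, -⟩ := hs
      rw [pullVal_up_right cs k hk1 hk hc, if_neg hm]
    · rw [ih j hj]
      symm; apply pullVal_succ_eq
      · exact hLq
      · intro hjk
        exfalso; exact hs ⟨by omega, hj⟩
  · rw [ih j hj]
    symm; apply pullVal_succ_eq
    · exact hLq
    · intro hjk; omega

lemma foldA_getD (cs : List Char) (k : Nat) :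
    ∀ j, j < cs.length → (foldA cs k).getD j "" = pullVal cs k j := by
  induction k with
  | zero =>
      intro j hj
      simp only [foldA, List.range_zero, List.foldl_nil, pullVal]
      simp [List.getD_eq_getElem?_getD, hj]
  | succ k ih =>
      intro j hj
      rw [foldA_succ]
      have hlen := foldA_length cs k
      simp only [stepA]
      split_ifs with h1 h2 h3
      · -- znak = '/'
        have hk : k < cs.length := by
          by_contra h
          rw [List.getD_eq_default _ _ (by omega)] at h1
          exact absurd h1 (by decide)
        exact doleva_step cs k _ hlen ih hk (Or.inl h1) j hj
          (fun _ => by rw [h1]; decide)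
      · -- znak = '\\'
        have hk : k < cs.length := by
          by_contra h
          rw [List.getD_eq_default _ _ (by omega)] at h2
          exact absurd h2 (by decide)
        simp only [kapkaDoprava, hlen]
        split_ifs with hk2 hm
        · rw [getD_set_eq, hlen]
          split_ifs with hs
          · obtain ⟨rfl, -⟩ := hs
            rw [pullVal_up_left cs k hk2 (Or.inl h2)]
          · rw [ih j hj]
            symm; apply pullVal_succ_eq
            · intro hjk; exfalso; exact hs ⟨by omega, hj⟩
            · intro _; rw [h2]; decide
        · exfalso
          rw [ih (k + 1) hk2, pullVal_at_succ] at hm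
          exact hm rfl
        · rw [ih j hj]
          symm; apply pullVal_succ_eq
          · intro hjk; exfalso; exact hk2 (by omega)
          · intro _; rw [h2]; decide
      · -- znak = 'X'
        have hk : k < cs.length := by
          by_contra h
          rw [List.getD_eq_default _ _ (by omega)] at h3
          exact absurd h3 (by decide)
        simp only [kapkaDoprava, kapkaDoleva_length, hlen]
        split_ifs with hk2 hm
        · rw [getD_set_eq, kapkaDoleva_length, hlen]
          split_ifs with hs
          · obtain ⟨rfl, -⟩ := hs
            rw [pullVal_up_left cs k hk2 (Or.inr h3)]
          · refine doleva_step cs k _ hlen ih hk (Or.inr h3) j hj ?_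
            intro hjk; exfalso; exact hs ⟨hjk.symm, hj⟩
        · exfalso
          rw [kapkaDoleva_getD_ne _ _ _ (by omega),
              ih (k + 1) hk2, pullVal_at_succ] at hm
          exact hm rfl
        · refine doleva_step cs k _ hlen ih hk (Or.inr h3) j hj ?_
          intro hjk; exfalso; exact hk2 (by omega)
      · -- other znak: nothing happens
        rw [ih j hj]
        symm; apply pullVal_succ_eq
        · intro _ hcc; rcases hcc with h | h
          · exact h2 h
          · exact h3 h
        · intro _ hcc; rcases hcc with h | h
          · exact h1 h
          · exact h3 h

lemma pullVal_full (cs : List Char) (j : Nat) (hj : j < cs.length) :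
    pullVal cs cs.length j = cellB cs cs.length j := by
  have e1 : ∀ P : Prop, (1 ≤ j ∧ j - 1 < cs.length ∧ P) ↔ (1 ≤ j ∧ P) :=
    fun P => ⟨fun ⟨a, _, c⟩ => ⟨a, c⟩, fun ⟨a, c⟩ => ⟨a, by omega, c⟩⟩
  have e2 : ∀ P : Prop, (j + 1 < cs.length ∧ j + 1 < cs.length ∧ P) ↔ (j + 1 < cs.length ∧ P) :=
    fun P => ⟨fun ⟨a, _, c⟩ => ⟨a, c⟩, fun ⟨a, c⟩ => ⟨a, a, c⟩⟩
  simp only [pullVal, cellB, e1, e2]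

-- ===== VERDICT (by name: the statement is the Claim_ definition above) =====
theorem steceni_kapeck_spec : Claim_equal_steceni_kapeck := by
  intro radek _
  unfold Spec_steceni_kapeck steceni_kapeck steceni_kapeck_alt
  apply List.ext_getElem
  · simpa using foldA_length radek.toList radek.toList.length
  · intro j h1 h2
    have hj : j < radek.toList.length := by simpa using h2
    have hfold : (foldA radek.toList radek.toList.length)[j]'(by rw [foldA_length]; exact hj)
        = pullVal radek.toList radek.toList.length j := by
      rw [← List.getD_eq_getElem _ "" ]
      exact foldA_getD radek.toList radek.toList.length j hj
    calc ((List.range radek.toList.length).foldl (stepA radek.toList)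
            (List.replicate radek.toList.length "-"))[j]'h1
        = pullVal radek.toList radek.toList.length j := hfold
      _ = cellB radek.toList radek.toList.length j := pullVal_full _ _ hj
      _ = ((List.range radek.toList.length).map (cellB radek.toList radek.toList.length))[j]'h2 := by
          simp
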